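-- pv_equiv track=rewrite | github.com/aidancmatthews99/cp1404practicals | prac_09/cleanup_files.py | get_fixed_filename
-- ===== SOURCE A (Python) =====
-- def get_fixed_filename(filename):
--     """Return a 'fixed' version of filename."""
--     filename = filename.replace(" ", "_").replace(".TXT", ".txt")
--     new_name = ''
--     previous_letter = ''
--     for letter in filename:
--         if letter.isupper() and previous_letter != '_' and previous_letter != '':
--             new_name += '_'
--         if previous_letter == ' ' or previous_letter == '_' or previous_letter == '':
--             letter = letter.upper()
--
--         new_name += letter
--         previous_letter = letter
--     return new_name
-- ===== SOURCE B (Python) =====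
-- def get_fixed_filename(filename):
--     """Return a 'fixed' version of filename (tokenize-then-capitalize decomposition)."""
--     filename = filename.replace(" ", "_").replace(".TXT", ".txt")
--     # insert '_' before each uppercase letter whose predecessor exists and is not '_'
--     marked = filename[:1] + ''.join(
--         ('_' + c) if (c.isupper() and p != '_') else c
--         for p, c in zip(filename, filename[1:]))
--     # capitalize the first character of every '_'-separated token
--     return '_'.join(w[:1].upper() + w[1:] for w in marked.split('_'))
-- ===== Notes on version B (the rewrite author's own statement) =====
-- stated objective: alternative
-- what changed: A's fused per-character state machine (tracking the previous transformed letter while interleaving underscore insertion and capitalization) is replaced by a three-stage pipeline: insert underscore markers via a zip over consecutive character pairs, split on underscores, capitalize each token's first character, and rejoin.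
import Mathlib
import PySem

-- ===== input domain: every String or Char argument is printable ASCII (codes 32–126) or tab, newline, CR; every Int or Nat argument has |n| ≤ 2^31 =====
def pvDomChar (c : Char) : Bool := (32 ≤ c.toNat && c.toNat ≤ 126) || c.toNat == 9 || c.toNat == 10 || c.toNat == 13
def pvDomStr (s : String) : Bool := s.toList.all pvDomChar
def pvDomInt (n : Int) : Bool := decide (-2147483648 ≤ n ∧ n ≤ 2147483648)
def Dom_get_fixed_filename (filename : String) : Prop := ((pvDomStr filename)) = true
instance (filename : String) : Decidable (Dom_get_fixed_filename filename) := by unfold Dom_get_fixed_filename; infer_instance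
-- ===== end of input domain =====

-- B replaces A's fused char-by-char state machine by a tokenize-then-capitalize pipeline
-- (insert '_' markers, split on '_', capitalize each token's first char, rejoin); objective: alternative.

-- ===== PORT A =====
-- the per-letter loop body of A: state = (new_name, previous_letter), both as char lists ('' = [])
def pvStepA (st : List Char × List Char) (letter : Char) : List Char × List Char :=
  let new_name := if PySem.Chars.isupper letter && !(st.2 == ['_']) && !(st.2 == ([] : List Char))
                  then st.1 ++ ['_'] else st.1
  let letter := if st.2 == [' '] || st.2 == ['_'] || st.2 == ([] : List Char)
                then PySem.Chars.upperChar letter else letter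
  (new_name ++ [letter], [letter])

def get_fixed_filename (filename : String) : String :=
  let filename := PySem.Str.replace (PySem.Str.replace filename " " "_") ".TXT" ".txt"
  String.mk (filename.toList.foldl pvStepA ([], [])).1

-- ===== PORT B =====
-- '_' + c if c is uppercase and its predecessor p is not '_', else just c  (the zip comprehension body)
def pvMark (p : Char × Char) : List Char :=
  if PySem.Chars.isupper p.2 && !(p.1 == '_') then ['_', p.2] else [p.2]

-- w[:1].upper() + w[1:]
def pvCap (w : List Char) : List Char := PySem.Chars.upper (w.take 1) ++ w.drop 1

def get_fixed_filename_alt (filename : String) : String :=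
  let f := (PySem.Str.replace (PySem.Str.replace filename " " "_") ".TXT" ".txt").toList
  let marked := f.take 1 ++ (f.zip f.tail).flatMap pvMark
  String.mk (PySem.Chars.join ['_'] ((PySem.Chars.splitOn marked ['_']).map pvCap))

-- ===== PRECONDITION & SPEC =====
def Spec_get_fixed_filename (filename : String) (out : String) : Prop := out = get_fixed_filename_alt filename
instance (filename : String) (out : String) : Decidable (Spec_get_fixed_filename filename out) := by unfold Spec_get_fixed_filename; infer_instance

-- ===== CLAIM (what is proved, stated in full; the proofs are below) =====
def Claim_equal_get_fixed_filename : Prop := ∀ (filename : String), Dom_get_fixed_filename filename → Spec_get_fixed_filename filename (get_fixed_filename filename)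

-- ===== LEMMAS AND PROOFS =====

-- intermediate semantics: capitalize-after-underscore (b = "previous char was '_' or start")
def pvCAU (b : Bool) : List Char → List Char
  | [] => []
  | c :: r => (if b then PySem.Chars.upperChar c else c) :: pvCAU (c == '_') r

-- the split pieces of a list at '_'
def pvSP : List Char → List (List Char)
  | [] => [[]]
  | c :: r => if c == '_' then [] :: pvSP r else (pvSP r).modifyHead (c :: ·)

-- the transformed tail of A's loop (b = "previous transformed letter is '_'")
def pvST (b : Bool) : List Char → List Char
  | [] => []
  | c :: r => if PySem.Chars.isupper c && !b then '_' :: c :: pvST (c == '_') r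
              else if b then PySem.Chars.upperChar c :: pvST (c == '_') r
              else c :: pvST (c == '_') r

-- the flatMap over consecutive pairs, recursively
def pvMT (p : Char) : List Char → List Char
  | [] => []
  | c :: r => pvMark (p, c) ++ pvMT c r

theorem pv_char_eq_iff (a b : Char) : a = b ↔ a.toNat = b.toNat :=
  ⟨fun h => h ▸ rfl, fun h => Char.ext (UInt32.toNat_inj.mp h)⟩

theorem pv_toNat_upperChar (c : Char) :
    (PySem.Chars.upperChar c).toNat = if 97 ≤ c.toNat ∧ c.toNat ≤ 122 then c.toNat - 32 else c.toNat := by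
  simp only [PySem.Chars.upperChar, PySem.Chars.islower]
  have h1 : (decide ('a' ≤ c) && decide (c ≤ 'z')) = true ↔ 97 ≤ c.toNat ∧ c.toNat ≤ 122 := by
    simp only [Bool.and_eq_true, decide_eq_true_eq, Char.le_def, UInt32.le_iff_toNat_le]
    exact Iff.rfl
  split_ifs with h h2 h2
  · rw [Char.toNat_ofNat, if_pos]
    have := h1.mp h
    left; omega
  · exact absurd (h1.mp h) h2
  · exact absurd (h1.mpr h2) h
  · rfl

theorem pv_upper_underscore (c : Char) : (PySem.Chars.upperChar c == '_') = (c == '_') := by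
  have h := pv_toNat_upperChar c
  rw [Bool.eq_iff_iff]
  simp only [beq_iff_eq, pv_char_eq_iff]
  have h95 : ('_' : Char).toNat = 95 := rfl
  rw [h95]
  split_ifs at h <;> omega

theorem pv_upper_space (c : Char) (hc : c ≠ ' ') : PySem.Chars.upperChar c ≠ ' ' := by
  have h := pv_toNat_upperChar c
  rw [ne_eq, pv_char_eq_iff] at hc ⊢
  have h32 : (' ' : Char).toNat = 32 := rfl
  rw [h32] at hc ⊢
  split_ifs at h <;> omega

theorem pv_isupper_iff (c : Char) : PySem.Chars.isupper c = true ↔ 65 ≤ c.toNat ∧ c.toNat ≤ 90 := by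
  simp only [PySem.Chars.isupper, Bool.and_eq_true, decide_eq_true_eq, Char.le_def, UInt32.le_iff_toNat_le]
  exact Iff.rfl

theorem pv_upper_of_isupper (c : Char) (h : PySem.Chars.isupper c = true) :
    PySem.Chars.upperChar c = c := by
  have h2 := pv_toNat_upperChar c
  have h3 := (pv_isupper_iff c).mp h
  rw [pv_char_eq_iff]
  split_ifs at h2 <;> omega

theorem pv_not_underscore_of_isupper (c : Char) (h : PySem.Chars.isupper c = true) :
    (c == '_') = false := by
  have h3 := (pv_isupper_iff c).mp h
  simp only [beq_eq_false_iff_ne, ne_eq, pv_char_eq_iff]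
  have h95 : ('_' : Char).toNat = 95 := rfl
  omega

-- ' ' never survives replace(" ", "_")
theorem pv_go_space_free (new : List Char) : ∀ (fuel : Nat) (l acc : List Char),
    l.length ≤ fuel → ' ' ∉ new → ' ' ∉ acc →
    ' ' ∉ PySem.Chars.replace.go [' '] new fuel l acc := by
  intro fuel
  induction fuel with
  | zero =>
    intro l acc hlen hn ha
    have : l = [] := List.eq_nil_of_length_eq_zero (Nat.le_zero.mp hlen)
    subst this
    rw [PySem.Chars.replace.go]
    simpa using ha
  | succ f ih =>
    intro l acc hlen hn ha
    cases l with
    | nil =>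
      rw [PySem.Chars.replace.go]
      · simpa using ha
      · simp
    | cons c t =>
      rw [PySem.Chars.replace.go]
      by_cases hp : [' '].isPrefixOf (c :: t) = true
      · rw [if_pos hp]
        apply ih
        · simp at hlen ⊢; omega
        · exact hn
        · intro hmem
          rcases List.mem_append.mp hmem with h1 | h2
          · exact hn (List.mem_reverse.mp h1)
          · exact ha h2
      · rw [if_neg hp]
        apply ih
        · simp at hlen ⊢; omega
        · exact hn
        · intro hmem
          rcases List.mem_cons.mp hmem with h1 | h2
          · apply hp
            simp [List.isPrefixOf, ← h1]
          · exact ha h2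

-- replace with a space-free source/new/acc stays space-free
theorem pv_go_space_pres (old new : List Char) : ∀ (fuel : Nat) (l acc : List Char),
    ' ' ∉ l → ' ' ∉ new → ' ' ∉ acc →
    ' ' ∉ PySem.Chars.replace.go old new fuel l acc := by
  intro fuel
  induction fuel with
  | zero =>
    intro l acc hl hn ha
    rw [PySem.Chars.replace.go]
    intro h
    rcases List.mem_append.mp h with h1 | h2
    · exact ha (List.mem_reverse.mp h1)
    · exact hl h2
  | succ f ih =>
    intro l acc hl hn ha
    cases l with
    | nil =>
      rw [PySem.Chars.replace.go]
      · simpa using ha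
      · simp
    | cons c t =>
      rw [PySem.Chars.replace.go]
      by_cases hp : old.isPrefixOf (c :: t) = true
      · rw [if_pos hp]
        apply ih
        · intro h; exact hl (List.mem_of_mem_drop h)
        · exact hn
        · intro h
          rcases List.mem_append.mp h with h1 | h2
          · exact hn (List.mem_reverse.mp h1)
          · exact ha h2
      · rw [if_neg hp]
        apply ih
        · intro h; exact hl (List.mem_cons_of_mem _ h)
        · exact hn
        · intro h
          rcases List.mem_cons.mp h with h1 | h2
          · exact hl (h1 ▸ List.mem_cons_self)
          · exact ha h2

theorem pv_replaced_space_free (s : String) :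
    ' ' ∉ (PySem.Str.replace (PySem.Str.replace s " " "_") ".TXT" ".txt").toList := by
  have h1 : ' ' ∉ (PySem.Str.replace s " " "_").toList := by
    simp only [PySem.Str.toList_replace]
    show ' ' ∉ PySem.Chars.replace s.toList [' '] ['_']
    rw [PySem.Chars.replace]
    rw [if_neg (by simp)]
    exact pv_go_space_free ['_'] s.toList.length s.toList [] le_rfl (by simp) (by simp)
  simp only [PySem.Str.toList_replace] at h1 ⊢
  show ' ' ∉ PySem.Chars.replace _ ['.','T','X','T'] ['.','t','x','t']
  rw [PySem.Chars.replace]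
  rw [if_neg (by simp)]
  apply pv_go_space_pres
  · exact h1
  · simp
  · simp

-- pvSP never returns []
theorem pv_SP_ne_nil (l : List Char) : pvSP l ≠ [] := by
  cases l with
  | nil => simp [pvSP]
  | cons c r =>
    simp only [pvSP]
    split_ifs with h
    · simp
    · cases hr : pvSP r with
      | nil => exact absurd hr (pv_SP_ne_nil r)
      | cons p ps => simp [List.modifyHead]

-- splitOn.go computes pvSP
theorem pv_splitOn_go (fuel : Nat) : ∀ (l cur : List Char) (acc : List (List Char)),
    l.length < fuel →
    PySem.Chars.splitOn.go ['_'] fuel l cur acc =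
      acc.reverse ++ (pvSP l).modifyHead (cur.reverse ++ ·) := by
  induction fuel with
  | zero => intro l cur acc h; omega
  | succ f ih =>
    intro l cur acc h
    cases l with
    | nil =>
      rw [PySem.Chars.splitOn.go]
      · simp [pvSP, List.modifyHead]
      · simp
    | cons c t =>
      rw [PySem.Chars.splitOn.go]
      by_cases hp : ['_'].isPrefixOf (c :: t) = true
      · have hc : c = '_' := by
          simp [List.isPrefixOf] at hp
          exact hp.symm
        rw [if_pos hp]
        have hd : List.drop ['_'].length (c :: t) = t := rfl
        rw [hd]
        rw [ih t [] _ (by simp at h ⊢; omega)]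
        subst hc
        simp only [pvSP, if_pos (by rfl : (('_' : Char) == '_') = true)]
        cases hr : pvSP t with
        | nil => exact absurd hr (pv_SP_ne_nil t)
        | cons p ps => simp [List.modifyHead]
      · have hc : (c == '_') = false := by
          simp [List.isPrefixOf] at hp
          simp [beq_eq_false_iff_ne]
          exact fun h' => hp h'.symm
        rw [if_neg hp]
        rw [ih t (c :: cur) acc (by simp at h ⊢; omega)]
        simp only [pvSP, hc, if_false, Bool.false_eq_true]
        cases hr : pvSP t with
        | nil => exact absurd hr (pv_SP_ne_nil t)
        | cons p ps => simp [List.modifyHead]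

theorem pv_splitOn (m : List Char) : PySem.Chars.splitOn m ['_'] = pvSP m := by
  rw [PySem.Chars.splitOn, pv_splitOn_go (m.length + 1) m [] [] (by omega)]
  cases hr : pvSP m with
  | nil => exact absurd hr (pv_SP_ne_nil m)
  | cons p ps => simp [List.modifyHead]

-- join in flatMap form
theorem pv_join_flat (a : List Char) (bs : List (List Char)) :
    PySem.Chars.join ['_'] (a :: bs) = a ++ bs.flatMap (fun q => '_' :: q) := by
  induction bs generalizing a with
  | nil => simp [PySem.Chars.join, List.intercalate]
  | cons b bs ih =>
    rw [PySem.Chars.join_cons_cons]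
    rw [show PySem.Chars.join ['_'] (b :: bs) = b ++ bs.flatMap (fun q => '_' :: q) from ih b]
    simp

-- cap of a cons capitalizes the head
theorem pv_cap_cons (c : Char) (p : List Char) :
    pvCap (c :: p) = PySem.Chars.upperChar c :: p := by
  simp [pvCap, PySem.Chars.upper]

theorem pv_cap_nil : pvCap [] = [] := by
  simp [pvCap, PySem.Chars.upper]

-- split-cap-join = capitalize-after-underscore (joint statement over the flag)
theorem pv_SCJ (m : List Char) :
    PySem.Chars.join ['_'] ((pvSP m).map pvCap) = pvCAU true m ∧
    (match pvSP m with
     | [] => []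
     | p :: ps => p ++ (ps.map pvCap).flatMap (fun q => '_' :: q)) = pvCAU false m := by
  induction m with
  | nil =>
    constructor
    · simp [pvSP, pvCAU, pv_cap_nil, PySem.Chars.join, List.intercalate]
    · simp [pvSP, pvCAU]
  | cons c r ih =>
    obtain ⟨ih1, ih2⟩ := ih
    by_cases hc : (c == '_') = true
    · have hc' : c = '_' := by simpa using hc
      subst hc'
      simp only [pvSP, if_pos (by rfl : (('_' : Char) == '_') = true)]
      cases hr : pvSP r with
      | nil => exact absurd hr (pv_SP_ne_nil r)
      | cons p ps =>
        rw [hr] at ih1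
        rw [List.map_cons, pv_join_flat] at ih1
        constructor
        · rw [List.map_cons, List.map_cons, pv_join_flat, pv_cap_nil]
          simp only [List.nil_append, List.flatMap_cons]
          simp only [pvCAU, if_true, show (('_' : Char) == '_') = true from rfl]
          rw [← ih1]
          have hu : PySem.Chars.upperChar '_' = '_' := rfl
          rw [hu]
          rfl
        · simp only [List.map_cons, List.flatMap_cons]
          simp only [pvCAU, if_false, show (('_' : Char) == '_') = true from rfl]
          rw [← ih1]
          rfl
    · have hc' : (c == '_') = false := by simpa using hc
      simp only [pvSP, hc', if_false, Bool.false_eq_true]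
      cases hr : pvSP r with
      | nil => exact absurd hr (pv_SP_ne_nil r)
      | cons p ps =>
        rw [hr] at ih2
        simp only at ih2
        constructor
        · simp only [List.modifyHead, List.map_cons, pv_cap_cons]
          rw [pv_join_flat]
          simp only [pvCAU, hc', if_true]
          rw [← ih2]
          simp
        · simp only [List.modifyHead]
          simp only [pvCAU, hc', if_false, Bool.false_eq_true]
          rw [← ih2]
          simp

-- the zip/flatMap of B equals the recursive pvMT
theorem pv_zip_flat (l : List Char) (p : Char) :
    ((p :: l).zip l).flatMap pvMark = pvMT p l := by
  induction l generalizing p with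
  | nil => simp [pvMT]
  | cons c r ih =>
    simp only [List.zip_cons_cons, List.flatMap_cons, pvMT]
    rw [← ih c]

-- capitalize-after-underscore of the marked tail = A's transformed tail
theorem pv_CAU_MT (r : List Char) : ∀ (p : Char),
    pvCAU (p == '_') (pvMT p r) = pvST (p == '_') r := by
  induction r with
  | nil => intro p; simp [pvMT, pvCAU, pvST]
  | cons c t ih =>
    intro p
    by_cases hu : (PySem.Chars.isupper c && !(p == '_')) = true
    · have hup : PySem.Chars.isupper c = true := by simp at hu; exact hu.1
      have hpn : (p == '_') = false := by
        simp only [Bool.and_eq_true, Bool.not_eq_eq_eq_not, Bool.not_true] at hu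
        exact hu.2
      have hcn := pv_not_underscore_of_isupper c hup
      have key : pvCAU false (pvMT c t) = pvST false t := by
        rw [← hcn]; exact ih c
      simp only [pvMT, pvMark, if_pos hu, List.cons_append, List.nil_append]
      simp only [pvCAU, hpn, Bool.false_eq_true, if_false,
        show (('_' : Char) == '_') = true from rfl, if_true,
        pv_upper_of_isupper c hup, hcn]
      simp only [pvST, hpn, hup, Bool.not_false, Bool.and_true, if_true]
      rw [key, hcn]
    · have hu' : (PySem.Chars.isupper c && !(p == '_')) = false := by simpa using hu
      simp only [pvMT, pvMark, hu', if_false, Bool.false_eq_true, List.cons_append, List.nil_append]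
      simp only [pvCAU]
      simp only [pvST, hu', if_false, Bool.false_eq_true]
      by_cases hb : (p == '_') = true
      · simp only [hb, if_true]
        rw [ih c]
      · have hb' : (p == '_') = false := by simpa using hb
        simp only [hb', if_false, Bool.false_eq_true]
        rw [ih c]

-- A's fold computes pvST
theorem pv_fold_ST (rest : List Char) : ∀ (acc : List Char) (q : Char),
    q ≠ ' ' → ' ' ∉ rest →
    (rest.foldl pvStepA (acc, [q])).1 = acc ++ pvST (q == '_') rest := by
  induction rest with
  | nil => intro acc q _ _; simp [pvST]
  | cons c t ih =>
    intro acc q hq hsp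
    have hcs : c ≠ ' ' := fun h => hsp (h ▸ List.mem_cons_self)
    have hts : ' ' ∉ t := fun h => hsp (List.mem_cons_of_mem _ h)
    have hqs : ([q] == [' ']) = false := by simpa using hq
    by_cases hb : (q == '_') = true
    · have hqt : ([q] == ['_']) = true := by simpa using hb
      have h1 : (PySem.Chars.isupper c && !([q] == ['_']) && !([q] == ([] : List Char))) = false := by
        simp [hqt]
      have h2 : (([q] == [' ']) || ([q] == ['_']) || ([q] == ([] : List Char))) = true := by
        simp [hqt]
      rw [List.foldl_cons]
      rw [show pvStepA (acc, [q]) c = (acc ++ [PySem.Chars.upperChar c], [PySem.Chars.upperChar c]) by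
        simp only [pvStepA, h1, h2, if_false, if_true, Bool.false_eq_true]]
      rw [ih _ _ (pv_upper_space c hcs) hts, pv_upper_underscore]
      simp only [pvST, hb, Bool.not_true, Bool.and_false, Bool.false_eq_true, if_false, if_true]
      simp
    · have hb' : (q == '_') = false := by simpa using hb
      have hqq : ([q] == ['_']) = false := by simpa using hb'
      by_cases hu : PySem.Chars.isupper c = true
      · have h1 : (PySem.Chars.isupper c && !([q] == ['_']) && !([q] == ([] : List Char))) = true := by
          simp [hu, hqq]
        have h2 : (([q] == [' ']) || ([q] == ['_']) || ([q] == ([] : List Char))) = false := by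
          simp [hqs, hqq]
        rw [List.foldl_cons]
        rw [show pvStepA (acc, [q]) c = ((acc ++ ['_']) ++ [c], [c]) by
          simp only [pvStepA, h1, h2, if_true, if_false, Bool.false_eq_true]]
        rw [ih _ _ hcs hts]
        simp only [pvST, hb', Bool.not_false, Bool.and_true, hu, if_true]
        simp
      · have hu' : PySem.Chars.isupper c = false := by simpa using hu
        have h1 : (PySem.Chars.isupper c && !([q] == ['_']) && !([q] == ([] : List Char))) = false := by
          simp [hu']
        have h2 : (([q] == [' ']) || ([q] == ['_']) || ([q] == ([] : List Char))) = false := by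
          simp [hqs, hqq]
        rw [List.foldl_cons]
        rw [show pvStepA (acc, [q]) c = (acc ++ [c], [c]) by
          simp only [pvStepA, h1, h2, if_false, Bool.false_eq_true]]
        rw [ih _ _ hcs hts]
        simp only [pvST, hb', Bool.not_false, Bool.and_true, hu', Bool.false_eq_true, if_false]
        simp

-- the core equivalence on any space-free char list
theorem pv_core (l : List Char) (hsp : ' ' ∉ l) :
    (l.foldl pvStepA ([], [])).1 =
    PySem.Chars.join ['_'] ((PySem.Chars.splitOn (l.take 1 ++ (l.zip l.tail).flatMap pvMark) ['_']).map pvCap) := by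
  cases l with
  | nil => simp [pv_splitOn, pvSP, pv_cap_nil, PySem.Chars.join, List.intercalate]
  | cons c rest =>
    have hcs : c ≠ ' ' := fun h => hsp (h ▸ List.mem_cons_self)
    have hts : ' ' ∉ rest := fun h => hsp (List.mem_cons_of_mem _ h)
    rw [List.foldl_cons]
    have hfirst : pvStepA ([], []) c = ([PySem.Chars.upperChar c], [PySem.Chars.upperChar c]) := by
      simp [pvStepA]
    rw [hfirst, pv_fold_ST rest [PySem.Chars.upperChar c] (PySem.Chars.upperChar c) (pv_upper_space c hcs) hts]
    rw [pv_splitOn]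
    have hmark : (c :: rest).take 1 ++ ((c :: rest).zip ((c :: rest).tail)).flatMap pvMark
        = c :: pvMT c rest := by
      simp only [List.tail_cons, List.take_succ_cons, List.take_zero]
      rw [pv_zip_flat rest c]
      rfl
    rw [hmark, (pv_SCJ (c :: pvMT c rest)).1]
    simp only [pvCAU, if_true]
    rw [pv_CAU_MT rest c, pv_upper_underscore]
    simp

-- ===== VERDICT (by name: the statement is the Claim_ definition above) =====
theorem get_fixed_filename_spec : Claim_equal_get_fixed_filename := by
  intro filename _
  show _ = _
  unfold get_fixed_filename get_fixed_filename_alt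
  exact congrArg String.mk (pv_core _ (pv_replaced_space_free filename))
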